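-- pv_equiv track=rewrite | github.com/zerobbreak/Cortex-Sorter-The-Intelligent-File-System-Janitor | main.py | contains_keywords
-- ===== SOURCE A (Python) =====
-- from typing import Optional, Dict, List, Tuple, Union
--
-- def contains_keywords(content: str, keywords: List[str]) -> Tuple[bool, Optional[str]]:
--     """
--     Checks if content contains any of the keywords.
--     Returns (match_found, matched_keyword).
--     """
--     if not content or not content.strip():
--         return False, None
--
--     if not keywords:
--         return False, None
--
--     content_lower = content.lower()
--     for keyword in keywords:
--         if not keyword or not keyword.strip():
--             continue
--
--         keyword_lower = keyword.lower().strip()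
--         if keyword_lower in content_lower:
--             return True, keyword
--
--     return False, None
-- ===== SOURCE B (Python) =====
-- from typing import Optional, List, Tuple
--
-- def contains_keywords(content: str, keywords: List[str]) -> Tuple[bool, Optional[str]]:
--     """Index the lowered content once by character; for each keyword probe only the
--     positions where its first character occurs, returning the first keyword that hits."""
--     if not content.strip():
--         return False, None
--     content_lower = content.lower()
--     pos = {}
--     for j, c in enumerate(content_lower):
--         pos.setdefault(c, []).append(j)
--     for k in keywords:
--         kl = k.lower().strip()
--         if not kl:
--             continue
--         if any(content_lower.startswith(kl, j) for j in pos.get(kl[0], [])):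
--             return True, k
--     return False, None
-- ===== Notes on version B (the rewrite author's own statement) =====
-- stated objective: alternative
-- what changed: B builds a character-to-positions index of the lowered content once and, for each keyword, probes only the positions of its first character, instead of A's whole-content substring scan per keyword.
import Mathlib
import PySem

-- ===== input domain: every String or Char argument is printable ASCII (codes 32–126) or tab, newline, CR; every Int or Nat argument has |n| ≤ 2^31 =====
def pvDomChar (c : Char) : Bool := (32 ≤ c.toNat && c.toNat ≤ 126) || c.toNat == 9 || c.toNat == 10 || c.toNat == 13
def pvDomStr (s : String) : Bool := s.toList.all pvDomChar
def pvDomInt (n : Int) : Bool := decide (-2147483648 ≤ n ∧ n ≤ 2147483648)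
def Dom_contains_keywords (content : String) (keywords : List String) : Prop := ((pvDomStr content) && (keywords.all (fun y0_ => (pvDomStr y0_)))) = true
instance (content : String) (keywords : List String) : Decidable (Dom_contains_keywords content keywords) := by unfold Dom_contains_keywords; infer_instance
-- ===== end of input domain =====

-- B indexes the lowered content once by character and, per keyword, probes only the
-- positions where its first character occurs (objective: alternative — a position
-- index replaces A's per-keyword whole-content substring scans).


-- ===== PORT A =====
-- the `for keyword in keywords` loop with `continue` and early return
def pvALoop (cl : List Char) : List String → Bool × Option String
  | [] => (false, none)
  | k :: rest =>
    if k.toList = [] ∨ PySem.Chars.strip k.toList = [] then pvALoop cl rest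
    else
      let kl := PySem.Chars.strip (PySem.Chars.lower k.toList)
      if PySem.Chars.isIn kl cl then (true, k) else pvALoop cl rest

def contains_keywords (content : String) (keywords : List String) : Bool × Option String :=
  if content.toList = [] ∨ PySem.Chars.strip content.toList = [] then (false, none)
  else if keywords = [] then (false, none)
  else pvALoop (PySem.Chars.lower content.toList) keywords

-- ===== PORT B =====
-- `for j, c in enumerate(content_lower): pos.setdefault(c, []).append(j)`
-- (setdefault-then-append = overwrite the key's list with j appended; key order preserved — exact)
def pvBIndex (cl : List Char) : PySem.Dict Char (List Int) :=
  (PySem.List.enumerate cl).foldl (fun d p => d.insert p.2 ((d.getD p.2 []) ++ [p.1])) PySem.Dict.empty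

-- the `for k in keywords` loop: skip blank keys, else probe pos.get(kl[0], []);
-- content_lower.startswith(kl, j) = startswith on the j-suffix (exact: 0 ≤ j < len here)
def pvBLoop (cl : List Char) (pos : PySem.Dict Char (List Int)) : List String → Bool × Option String
  | [] => (false, none)
  | k :: rest =>
    match PySem.Chars.strip (PySem.Chars.lower k.toList) with
    | [] => pvBLoop cl pos rest
    | c :: cs =>
      if (pos.getD c []).any (fun j => PySem.Chars.startswith (cl.drop j.toNat) (c :: cs)) then
        (true, k)
      else pvBLoop cl pos rest

def contains_keywords_alt (content : String) (keywords : List String) : Bool × Option String :=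
  if PySem.Chars.strip content.toList = [] then (false, none)
  else
    let cl := PySem.Chars.lower content.toList
    pvBLoop cl (pvBIndex cl) keywords

-- ===== PRECONDITION & SPEC =====
def Spec_contains_keywords (content : String) (keywords : List String) (out : Bool × Option String) : Prop := out = contains_keywords_alt content keywords
instance (content : String) (keywords : List String) (out : Bool × Option String) : Decidable (Spec_contains_keywords content keywords out) := by unfold Spec_contains_keywords; infer_instance

-- ===== CLAIM (what is proved, stated in full; the proofs are below) =====
def Claim_equal_contains_keywords : Prop := ∀ (content : String) (keywords : List String), Dom_contains_keywords content keywords → Spec_contains_keywords content keywords (contains_keywords content keywords)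

-- ===== LEMMAS AND PROOFS =====

theorem pv_isspace_false_mid (c : Char) (hlo : 33 ≤ c.toNat) (hhi : c.toNat ≤ 126) :
    PySem.Chars.isspace c = false := by
  unfold PySem.Chars.isspace
  simp only [Bool.or_eq_false_iff, Bool.and_eq_false_iff, decide_eq_false_iff_not]
  omega

theorem pv_isspace_lowerChar (c : Char) :
    PySem.Chars.isspace (PySem.Chars.lowerChar c) = PySem.Chars.isspace c := by
  unfold PySem.Chars.lowerChar
  split
  · next h =>
    unfold PySem.Chars.isupper at h
    simp only [Bool.and_eq_true, decide_eq_true_eq, Char.le_def, UInt32.le_iff_toNat_le] at h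
    have h1 : 65 ≤ c.toNat ∧ c.toNat ≤ 90 := by
      unfold Char.toNat
      exact h
    have h2 : (Char.ofNat (c.toNat + 32)).toNat = c.toNat + 32 := by
      rw [Char.toNat_ofNat, if_pos (Or.inl (by omega))]
    rw [pv_isspace_false_mid _ (by omega) (by omega), pv_isspace_false_mid c (by omega) (by omega)]
  · rfl

-- strip commutes with lower (lowerChar never changes whitespace-ness)
theorem pv_strip_lower (xs : List Char) :
    PySem.Chars.strip (PySem.Chars.lower xs) = PySem.Chars.lower (PySem.Chars.strip xs) := by
  have hfun : (PySem.Chars.isspace ∘ PySem.Chars.lowerChar) = PySem.Chars.isspace :=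
    funext pv_isspace_lowerChar
  unfold PySem.Chars.strip PySem.Chars.lower PySem.Chars.lstrip PySem.Chars.rstrip
  simp [← List.map_reverse, List.dropWhile_map, hfun]

-- the index-building fold, characterised per key
theorem pv_index_fold_getD (c : Char) :
    ∀ (es : List (Int × Char)) (d : PySem.Dict Char (List Int)),
    (es.foldl (fun d p => d.insert p.2 ((d.getD p.2 []) ++ [p.1])) d).getD c []
      = d.getD c [] ++ (es.filter (fun p => p.2 == c)).map (·.1) := by
  intro es
  induction es with
  | nil => simp
  | cons p rest ih =>
    intro d
    simp only [List.foldl_cons, ih, List.filter_cons]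
    by_cases hc : p.2 = c
    · simp [hc]
    · simp [PySem.Dict.getD_insert, hc, Ne.symm hc]

theorem pv_mem_index (cl : List Char) (c : Char) (j : Int) :
    j ∈ (pvBIndex cl).getD c [] ↔ ∃ jn : Nat, jn < cl.length ∧ j = (jn : Int) ∧ cl[jn]? = some c := by
  rw [pvBIndex, pv_index_fold_getD]
  simp only [PySem.Dict.getD_empty, List.nil_append, List.mem_map, List.mem_filter]
  constructor
  · rintro ⟨p, ⟨hp, hpc⟩, rfl⟩
    rcases (PySem.List.mem_enumerate_iff cl 0 p).mp hp with ⟨k, hk, rfl⟩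
    refine ⟨k, hk, by simp, ?_⟩
    rw [List.getElem?_eq_getElem hk]
    exact congrArg some (by simpa using hpc)
  · rintro ⟨jn, hjn, rfl, hc⟩
    have hg : cl[jn] = c := by
      rw [List.getElem?_eq_getElem hjn] at hc
      exact Option.some.inj hc
    refine ⟨((jn : Int), c), ⟨?_, by simp⟩, rfl⟩
    exact (PySem.List.mem_enumerate_iff cl 0 _).mpr ⟨jn, hjn, by simp [hg]⟩

-- a bounded starting position suffices on a nonempty haystack
theorem pv_exists_bounded_iff_isIn (cl sub : List Char) (hcl : cl ≠ []) :
    (∃ jn : Nat, jn < cl.length ∧ sub <+: cl.drop jn) ↔ PySem.Chars.isIn sub cl = true := by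
  constructor
  · rintro ⟨jn, _, hpre⟩
    exact (PySem.Chars.exists_prefix_drop_iff_isIn sub cl).mp ⟨jn, hpre⟩
  · intro h
    rcases (PySem.Chars.exists_prefix_drop_iff_isIn sub cl).mpr h with ⟨j, hpre⟩
    by_cases hj : j < cl.length
    · exact ⟨j, hj, hpre⟩
    · have hdrop : cl.drop j = [] := List.drop_eq_nil_of_le (by omega)
      have hsub : sub = [] := List.prefix_nil.mp (hdrop ▸ hpre)
      exact ⟨0, by cases cl <;> simp_all, by simp [hsub]⟩

-- probing the first-character positions decides substring membership
theorem pv_any_iff_isIn (cl : List Char) (hcl : cl ≠ []) (c : Char) (cs : List Char) :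
    ((pvBIndex cl).getD c []).any (fun j => PySem.Chars.startswith (cl.drop j.toNat) (c :: cs))
      = PySem.Chars.isIn (c :: cs) cl := by
  by_cases hIn : PySem.Chars.isIn (c :: cs) cl = true
  · rw [hIn]
    rcases (pv_exists_bounded_iff_isIn cl (c :: cs) hcl).mpr hIn with ⟨jn, hjn, hpre⟩
    have hc : cl[jn]? = some c := by
      rcases hpre with ⟨t, ht⟩
      rw [← List.head?_drop, ← ht]
      rfl
    refine List.any_eq_true.mpr ⟨(jn : Int), (pv_mem_index cl c _).mpr ⟨jn, hjn, rfl, hc⟩, ?_⟩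
    exact (PySem.Chars.startswith_iff _ _).mpr (by simpa using hpre)
  · simp only [Bool.not_eq_true] at hIn
    rw [hIn]
    apply List.any_eq_false.mpr
    rintro j hj
    rcases (pv_mem_index cl c j).mp hj with ⟨jn, hjn, rfl, _⟩
    intro hsw
    have hpre := (PySem.Chars.startswith_iff _ _).mp hsw
    have : PySem.Chars.isIn (c :: cs) cl = true :=
      (pv_exists_bounded_iff_isIn cl (c :: cs) hcl).mp ⟨jn, hjn, by simpa using hpre⟩
    simp [this] at hIn

-- B's keyword loop equals A's keyword loop
theorem pv_bLoop_eq_aLoop (cl : List Char) (hcl : cl ≠ []) :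
    ∀ (ks : List String), pvBLoop cl (pvBIndex cl) ks = pvALoop cl ks := by
  intro ks
  induction ks with
  | nil => rfl
  | cons k rest ih =>
    have hcomm := pv_strip_lower k.toList
    by_cases hk : PySem.Chars.strip k.toList = []
    · have hkl : PySem.Chars.strip (PySem.Chars.lower k.toList) = [] := by
        rw [hcomm, hk]; rfl
      have hcond : k.toList = [] ∨ PySem.Chars.strip k.toList = [] := Or.inr hk
      simp only [pvBLoop, pvALoop, hkl, if_pos hcond]
      exact ih
    · have hkl : PySem.Chars.strip (PySem.Chars.lower k.toList) ≠ [] := by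
        rw [hcomm]
        intro h
        exact hk (List.map_eq_nil_iff.mp h)
      have hcond : ¬ (k.toList = [] ∨ PySem.Chars.strip k.toList = []) := by
        rintro (h | h)
        · exact hk (by rw [h]; rfl)
        · exact hk h
      rcases hkl' : PySem.Chars.strip (PySem.Chars.lower k.toList) with _ | ⟨c, cs⟩
      · exact absurd hkl' hkl
      · simp only [pvBLoop, pvALoop, hkl', if_neg hcond, pv_any_iff_isIn cl hcl c cs]
        by_cases hIn : PySem.Chars.isIn (c :: cs) cl = true
        · simp [hIn]
        · simp only [Bool.not_eq_true] at hIn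
          simp [hIn]
          exact ih

-- ===== VERDICT (by name: the statement is the Claim_ definition above) =====
theorem contains_keywords_spec : Claim_equal_contains_keywords := by
  intro content keywords _
  unfold Spec_contains_keywords contains_keywords contains_keywords_alt
  by_cases hblank : PySem.Chars.strip content.toList = []
  · simp [hblank]
  · have hcontent : content.toList ≠ [] := by
      intro h; exact hblank (by rw [h]; rfl)
    have hcond : ¬ (content.toList = [] ∨ PySem.Chars.strip content.toList = []) := by
      rintro (h | h); exacts [hcontent h, hblank h]
    simp only [if_neg hcond, if_neg hblank]
    have hcl : PySem.Chars.lower content.toList ≠ [] := by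
      intro h
      unfold PySem.Chars.lower at h
      rw [List.map_eq_nil_iff] at h
      exact hcontent h
    by_cases hks : keywords = []
    · subst hks
      rw [if_pos rfl]; rfl
    · rw [if_neg hks]
      exact (pv_bLoop_eq_aLoop _ hcl keywords).symm
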